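-- pv_equiv track=rewrite | github.com/somapujith/sentinel-scanner | backend/scanner/header_checker.py | _robots_disallows_all
-- ===== SOURCE A (Python) =====
-- def _robots_disallows_all(robots_body: str) -> bool:
--     """True if User-agent: * has Disallow: / (full-site disallow for all crawlers)."""
--     current_agent: str | None = None
--     for raw in robots_body.splitlines():
--         ln = raw.strip()
--         if not ln or ln.startswith("#"):
--             continue
--         low = ln.lower()
--         if low.startswith("user-agent:"):
--             current_agent = ln.split(":", 1)[1].strip()
--             continue
--         if current_agent == "*" and low.startswith("disallow:"):
--             path = ln.split(":", 1)[1].strip()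
--             if path == "/":
--                 return True
--     return False
-- ===== SOURCE B (Python) =====
-- def _robots_disallows_all(robots_body: str) -> bool:
--     """True if User-agent: * has Disallow: / (full-site disallow for all crawlers)."""
--     agents: dict = {}
--     current = None
--     for raw in robots_body.splitlines():
--         ln = raw.strip()
--         if not ln or ln.startswith("#"):
--             continue
--         low = ln.lower()
--         if low.startswith("user-agent:"):
--             current = ln.split(":", 1)[1].strip()
--             agents.setdefault(current, [])
--         elif low.startswith("disallow:"):
--             agents.setdefault(current, []).append(ln.split(":", 1)[1].strip())
--     return "/" in agents.get("*", [])
-- ===== Notes on version B (the rewrite author's own statement) =====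
-- stated objective: alternative
-- what changed: Replaces the fused early-return scan with a build-then-check decomposition: one pass groups every Disallow path under its agent in a dict, and the decision ('/' among the '*' agent's paths) is made once after the loop.
import Mathlib
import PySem

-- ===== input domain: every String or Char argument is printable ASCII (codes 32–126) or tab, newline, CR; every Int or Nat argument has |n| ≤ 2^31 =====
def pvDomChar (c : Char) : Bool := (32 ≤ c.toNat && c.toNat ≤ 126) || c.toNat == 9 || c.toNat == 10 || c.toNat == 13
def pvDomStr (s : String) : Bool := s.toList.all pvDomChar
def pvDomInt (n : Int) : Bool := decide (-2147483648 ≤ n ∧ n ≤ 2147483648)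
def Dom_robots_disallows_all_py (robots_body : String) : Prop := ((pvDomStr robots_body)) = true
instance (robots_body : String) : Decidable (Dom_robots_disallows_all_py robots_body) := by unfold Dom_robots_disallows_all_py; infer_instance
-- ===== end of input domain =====

-- B restructures A's fused early-return scan into a build-then-check decomposition:
-- one pass groups each Disallow path under its agent in a dict, the decision is made after the loop.


-- ln.split(":", 1)[1].strip() — index 1 exists whenever the line contains ':' (both programs only
-- call this on lines whose lowercase form starts with "user-agent:" or "disallow:"), so List.getD is exact there.
def pvSplitColonStrip (ln : String) : String :=
  PySem.Str.strip (((PySem.Str.splitMax? ln ":" 1).getD []).getD 1 "")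

-- ===== PORT A =====
def robotsA_loop : List String → Option String → Bool
  | [], _ => false
  | raw :: rest, cur =>
    let ln := PySem.Str.strip raw
    if ln == "" || PySem.Str.startswith ln "#" then robotsA_loop rest cur
    else
      let low := PySem.Str.lower ln
      if PySem.Str.startswith low "user-agent:" then
        robotsA_loop rest (some (pvSplitColonStrip ln))
      else if cur == some "*" && PySem.Str.startswith low "disallow:" then
        if pvSplitColonStrip ln == "/" then true else robotsA_loop rest cur
      else robotsA_loop rest cur

def robots_disallows_all_py (robots_body : String) : Bool :=
  robotsA_loop (PySem.Str.splitlines robots_body) none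

-- ===== PORT B =====
def robotsB_step (st : PySem.Dict (Option String) (List String) × Option String) (raw : String) :
    PySem.Dict (Option String) (List String) × Option String :=
  let ln := PySem.Str.strip raw
  if ln == "" || PySem.Str.startswith ln "#" then st
  else
    let low := PySem.Str.lower ln
    if PySem.Str.startswith low "user-agent:" then
      let a := some (pvSplitColonStrip ln)
      (st.1.setdefault a [], a)
    else if PySem.Str.startswith low "disallow:" then
      -- setdefault(current, []).append(path): the list stored under current gains one element
      (st.1.insert st.2 (st.1.getD st.2 [] ++ [pvSplitColonStrip ln]), st.2)
    else st

def robots_disallows_all_py_alt (robots_body : String) : Bool :=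
  let agents := ((PySem.Str.splitlines robots_body).foldl robotsB_step (PySem.Dict.empty, none)).1
  (agents.getD (some "*") []).contains "/"

-- ===== PRECONDITION & SPEC =====
def Spec_robots_disallows_all_py (robots_body : String) (out : Bool) : Prop := out = robots_disallows_all_py_alt robots_body
instance (robots_body : String) (out : Bool) : Decidable (Spec_robots_disallows_all_py robots_body out) := by unfold Spec_robots_disallows_all_py; infer_instance

-- ===== CLAIM (what is proved, stated in full; the proofs are below) =====
def Claim_equal_robots_disallows_all_py : Prop := ∀ (robots_body : String), Dom_robots_disallows_all_py robots_body → Spec_robots_disallows_all_py robots_body (robots_disallows_all_py robots_body)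

-- ===== LEMMAS AND PROOFS =====

-- step-shape lemmas for the two loop bodies (one per branch)
lemma stepA_skip (raw : String) (rest : List String) (cur : Option String)
    (h : (PySem.Str.strip raw == "" || PySem.Str.startswith (PySem.Str.strip raw) "#") = true) :
    robotsA_loop (raw :: rest) cur = robotsA_loop rest cur := by
  conv_lhs => unfold robotsA_loop
  rw [if_pos h]

lemma stepB_skip (raw : String) (st : PySem.Dict (Option String) (List String) × Option String)
    (h : (PySem.Str.strip raw == "" || PySem.Str.startswith (PySem.Str.strip raw) "#") = true) :
    robotsB_step st raw = st := by
  unfold robotsB_step; rw [if_pos h]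

lemma stepA_agent (raw : String) (rest : List String) (cur : Option String)
    (h : ¬ (PySem.Str.strip raw == "" || PySem.Str.startswith (PySem.Str.strip raw) "#") = true)
    (h2 : PySem.Str.startswith (PySem.Str.lower (PySem.Str.strip raw)) "user-agent:" = true) :
    robotsA_loop (raw :: rest) cur = robotsA_loop rest (some (pvSplitColonStrip (PySem.Str.strip raw))) := by
  conv_lhs => unfold robotsA_loop
  rw [if_neg h, if_pos h2]

lemma stepB_agent (raw : String) (st : PySem.Dict (Option String) (List String) × Option String)
    (h : ¬ (PySem.Str.strip raw == "" || PySem.Str.startswith (PySem.Str.strip raw) "#") = true)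
    (h2 : PySem.Str.startswith (PySem.Str.lower (PySem.Str.strip raw)) "user-agent:" = true) :
    robotsB_step st raw = (st.1.setdefault (some (pvSplitColonStrip (PySem.Str.strip raw))) [],
                           some (pvSplitColonStrip (PySem.Str.strip raw))) := by
  unfold robotsB_step; rw [if_neg h, if_pos h2]

lemma stepA_dis (raw : String) (rest : List String) (cur : Option String)
    (h : ¬ (PySem.Str.strip raw == "" || PySem.Str.startswith (PySem.Str.strip raw) "#") = true)
    (h2 : ¬ PySem.Str.startswith (PySem.Str.lower (PySem.Str.strip raw)) "user-agent:" = true)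
    (h3 : (cur == some "*" && PySem.Str.startswith (PySem.Str.lower (PySem.Str.strip raw)) "disallow:") = true) :
    robotsA_loop (raw :: rest) cur =
      (if (pvSplitColonStrip (PySem.Str.strip raw) == "/") = true then true else robotsA_loop rest cur) := by
  conv_lhs => unfold robotsA_loop
  rw [if_neg h, if_neg h2, if_pos h3]

lemma stepA_other (raw : String) (rest : List String) (cur : Option String)
    (h : ¬ (PySem.Str.strip raw == "" || PySem.Str.startswith (PySem.Str.strip raw) "#") = true)
    (h2 : ¬ PySem.Str.startswith (PySem.Str.lower (PySem.Str.strip raw)) "user-agent:" = true)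
    (h3 : ¬ (cur == some "*" && PySem.Str.startswith (PySem.Str.lower (PySem.Str.strip raw)) "disallow:") = true) :
    robotsA_loop (raw :: rest) cur = robotsA_loop rest cur := by
  conv_lhs => unfold robotsA_loop
  rw [if_neg h, if_neg h2, if_neg h3]

lemma stepB_dis (raw : String) (st : PySem.Dict (Option String) (List String) × Option String)
    (h : ¬ (PySem.Str.strip raw == "" || PySem.Str.startswith (PySem.Str.strip raw) "#") = true)
    (h2 : ¬ PySem.Str.startswith (PySem.Str.lower (PySem.Str.strip raw)) "user-agent:" = true)
    (h3 : PySem.Str.startswith (PySem.Str.lower (PySem.Str.strip raw)) "disallow:" = true) :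
    robotsB_step st raw = (st.1.insert st.2 (st.1.getD st.2 [] ++ [pvSplitColonStrip (PySem.Str.strip raw)]), st.2) := by
  unfold robotsB_step; rw [if_neg h, if_neg h2, if_pos h3]

lemma stepB_other (raw : String) (st : PySem.Dict (Option String) (List String) × Option String)
    (h : ¬ (PySem.Str.strip raw == "" || PySem.Str.startswith (PySem.Str.strip raw) "#") = true)
    (h2 : ¬ PySem.Str.startswith (PySem.Str.lower (PySem.Str.strip raw)) "user-agent:" = true)
    (h3 : ¬ PySem.Str.startswith (PySem.Str.lower (PySem.Str.strip raw)) "disallow:" = true) :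
    robotsB_step st raw = st := by
  unfold robotsB_step; rw [if_neg h, if_neg h2, if_neg h3]

-- setdefault never changes getD _ []
lemma getD_setdefault (d : PySem.Dict (Option String) (List String)) (k j : Option String) :
    (d.setdefault k []).getD j [] = d.getD j [] := by
  by_cases h : d.contains k = true
  · rw [PySem.Dict.setdefault_of_contains d ([] : List String) h]
  · rw [PySem.Dict.setdefault_of_not_contains d ([] : List String) (by simpa using h)]
    rw [PySem.Dict.getD_insert]
    split_ifs with hj
    · subst hj; exact (PySem.Dict.getD_of_not_contains _ _ (by simpa using h)).symm
    · rfl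

-- main invariant: "/"-membership under '*' after the B fold = A's early-return result OR what is already there
lemma key_lemma (lines : List String) (d : PySem.Dict (Option String) (List String)) (cur : Option String) :
    ((lines.foldl robotsB_step (d, cur)).1.getD (some "*") []).contains "/"
      = (robotsA_loop lines cur || (d.getD (some "*") []).contains "/") := by
  induction lines generalizing d cur with
  | nil => simp [robotsA_loop]
  | cons raw rest ih =>
    rw [List.foldl_cons]
    by_cases h1 : (PySem.Str.strip raw == "" || PySem.Str.startswith (PySem.Str.strip raw) "#") = true
    · rw [stepB_skip raw _ h1, stepA_skip raw rest cur h1, ih]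
    · by_cases h2 : PySem.Str.startswith (PySem.Str.lower (PySem.Str.strip raw)) "user-agent:" = true
      · rw [stepB_agent raw _ h1 h2, stepA_agent raw rest cur h1 h2, ih]
        rw [getD_setdefault]
      · by_cases hd : PySem.Str.startswith (PySem.Str.lower (PySem.Str.strip raw)) "disallow:" = true
        · rw [stepB_dis raw _ h1 h2 hd]
          by_cases hc : (cur == some "*") = true
          · have hcur : cur = some "*" := by simpa using hc
            rw [stepA_dis raw rest cur h1 h2 (by rw [hc, hd]; rfl), ih, hcur]
            rw [PySem.Dict.getD_insert, if_pos rfl, List.contains_append]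
            by_cases h4 : (pvSplitColonStrip (PySem.Str.strip raw) == "/") = true
            · have he : pvSplitColonStrip (PySem.Str.strip raw) = "/" := by simpa using h4
              simp [he]
            · have hne : ("/" : String) ≠ pvSplitColonStrip (PySem.Str.strip raw) :=
                fun h => h4 (by simp [h.symm])
              rw [if_neg (by simpa using h4)]
              have hz : ([pvSplitColonStrip (PySem.Str.strip raw)].contains "/") = false := by
                simp [hne]
              rw [hz]
              cases robotsA_loop rest (some "*") <;> simp
          · rw [stepA_other raw rest cur h1 h2 (by simp [hc]), ih]
            rw [PySem.Dict.getD_insert, if_neg (fun h => hc (by simp [h]))]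
        · rw [stepB_other raw _ h1 h2 hd,
              stepA_other raw rest cur h1 h2 (fun hx => hd (Bool.and_eq_true_iff.mp hx).2), ih]

-- ===== VERDICT (by name: the statement is the Claim_ definition above) =====
theorem robots_disallows_all_py_spec : Claim_equal_robots_disallows_all_py := by
  intro s _
  show robots_disallows_all_py s = robots_disallows_all_py_alt s
  unfold robots_disallows_all_py robots_disallows_all_py_alt
  rw [key_lemma]
  simp
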